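-- pv_equiv track=rewrite | github.com/KristoffLiu/YorkCSSolution | Software 1/Practical/Week 07/Practical 11/recursion.py | something_ish
-- ===== SOURCE A (Python) =====
-- def something_ish(pattern,word):
--     if pattern:
--         if word.count(pattern[0]) > 0:
--             return something_ish(pattern[1:len(pattern)],word)
--         else:
--             False
--     else:
--         return True
-- ===== SOURCE B (Python) =====
-- def something_ish(pattern, word):
--     # Iterative: scan for a missing char; bare return (None) if found, else True.
--     for c in pattern:
--         if word.count(c) <= 0:
--             return
--     return True
-- ===== Notes on version B (the rewrite author's own statement) =====
-- stated objective: simpler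
-- what changed: Replaced slice-building recursion (pattern[1:] copies on every call) with a flat for-loop over the pattern's characters with an early bare return, preserving the implicit None on a missing character.
import Mathlib
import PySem

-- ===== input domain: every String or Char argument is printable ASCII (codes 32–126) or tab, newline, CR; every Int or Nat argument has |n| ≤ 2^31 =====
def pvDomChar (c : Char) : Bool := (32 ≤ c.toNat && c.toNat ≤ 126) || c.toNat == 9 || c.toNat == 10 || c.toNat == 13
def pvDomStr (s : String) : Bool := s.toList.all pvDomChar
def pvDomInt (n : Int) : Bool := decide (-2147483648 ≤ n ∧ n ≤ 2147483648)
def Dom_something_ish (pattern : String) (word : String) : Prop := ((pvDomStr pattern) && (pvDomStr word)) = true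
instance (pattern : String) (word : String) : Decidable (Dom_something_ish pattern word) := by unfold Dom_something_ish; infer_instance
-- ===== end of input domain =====

-- B: flat loop over pattern chars instead of slice-building recursion (simpler; same values incl. None on a missing char).
-- ===== PORT A =====
def goA_something_ish : List Char → String → Option Bool
  | [], _ => some true                                      -- else: return True
  | c :: rest, word =>                                      -- if pattern:
      if PySem.Str.count word (String.singleton c) > 0 then -- if word.count(pattern[0]) > 0:
        goA_something_ish rest word                         --   return something_ish(pattern[1:len(pattern)], word)
      else
        none                                                -- bare `False` expression: falls off, returns None

def something_ish (pattern : String) (word : String) : Option Bool :=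
  goA_something_ish pattern.toList word

-- ===== PORT B =====
def something_ish_alt (pattern : String) (word : String) : Option Bool :=
  -- for c in pattern: if word.count(c) <= 0: return    (bare return = none)
  if pattern.toList.any (fun c => PySem.Str.count word (String.singleton c) ≤ 0) then
    none
  else
    some true                                               -- return True

-- ===== PRECONDITION & SPEC =====
def Spec_something_ish (pattern : String) (word : String) (out : Option Bool) : Prop := out = something_ish_alt pattern word
instance (pattern : String) (word : String) (out : Option Bool) : Decidable (Spec_something_ish pattern word out) := by unfold Spec_something_ish; infer_instance

-- ===== CLAIM (what is proved, stated in full; the proofs are below) =====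
def Claim_equal_something_ish : Prop := ∀ (pattern : String) (word : String), Dom_something_ish pattern word → Spec_something_ish pattern word (something_ish pattern word)

-- ===== LEMMAS AND PROOFS =====

theorem goA_eq (l : List Char) (word : String) :
    goA_something_ish l word =
      if l.any (fun c => PySem.Str.count word (String.singleton c) ≤ 0) then none
      else some true := by
  induction l with
  | nil => simp [goA_something_ish]
  | cons c rest ih =>
      simp only [goA_something_ish, List.any_cons, ih]
      by_cases h : PySem.Chars.count word.toList [c] = 0
      · simp [h]
      · simp [h, Nat.pos_of_ne_zero h]

-- ===== VERDICT (by name: the statement is the Claim_ definition above) =====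
theorem something_ish_spec : Claim_equal_something_ish := by
  intro pattern word _
  unfold Spec_something_ish something_ish something_ish_alt
  exact goA_eq pattern.toList word
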